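-- pv_equiv track=rewrite | github.com/hgedawy/15110-S25-Demos | Week10/Syntax.py | calculate_grade_distribution_with_lists
-- ===== SOURCE A (Python) =====
-- def calculate_grade_distribution_with_lists(grades):
--     unique_grades = []
--     grade_frequencies = []
--
--     for grade in grades:
--         if grade in unique_grades:
--             index = unique_grades.index(grade)
--             grade_frequencies[index] += 1
--         else:
--             unique_grades.append(grade)
--             grade_frequencies.append(1)
--
--     return unique_grades, grade_frequencies
-- ===== SOURCE B (Python) =====
-- def calculate_grade_distribution_with_lists(grades):
--     grades = list(grades)
--     unique_grades = []
--     for grade in grades: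
--         if grade not in unique_grades:
--             unique_grades.append(grade)
--     grade_frequencies = [grades.count(grade) for grade in unique_grades]
--     return unique_grades, grade_frequencies
-- ===== Notes on version B (the rewrite author's own statement) =====
-- stated objective: alternative
-- what changed: Replaces A's single loop that maintains two parallel lists in lockstep (appending or bumping freq[index] per element) with a staged two-pass decomposition: one pass builds only the ordered list of distinct grades, then a separate comprehension computes each frequency with a full list.count scan.
import Mathlib
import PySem

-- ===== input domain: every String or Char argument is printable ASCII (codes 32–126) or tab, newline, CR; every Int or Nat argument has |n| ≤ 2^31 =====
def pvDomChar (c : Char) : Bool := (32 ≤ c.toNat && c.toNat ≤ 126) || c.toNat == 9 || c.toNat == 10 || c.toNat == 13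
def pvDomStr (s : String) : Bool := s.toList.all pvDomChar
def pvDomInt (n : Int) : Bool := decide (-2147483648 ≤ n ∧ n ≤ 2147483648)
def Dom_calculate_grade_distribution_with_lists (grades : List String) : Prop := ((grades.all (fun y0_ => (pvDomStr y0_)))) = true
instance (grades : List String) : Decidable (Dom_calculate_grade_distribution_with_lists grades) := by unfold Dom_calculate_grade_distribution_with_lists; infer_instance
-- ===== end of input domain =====

-- B restructures A's single incremental-counting loop into two staged passes: first build
-- only the ordered distinct-grade list, then compute each frequency with a full count scan.

-- ===== PORT A =====
-- A's loop: one pass keeping (unique_grades, grade_frequencies) in lockstep.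
-- 'unique_grades.index(grade)' is ported as List.idxOf: under the guard 'grade ∈ s.1'
-- the element is present, where Python's .index and idxOf agree (no exception possible).
def calculate_grade_distribution_with_lists (grades : List String) : List String × List Int :=
  grades.foldl
    (fun s grade =>
      if grade ∈ s.1 then
        (s.1, s.2.modify (s.1.idxOf grade) (· + 1))
      else
        (s.1 ++ [grade], s.2 ++ [1]))
    ([], [])

-- ===== PORT B =====
-- B: pass 1 collects the distinct grades in first-appearance order; pass 2 is the
-- comprehension [grades.count(g) for g in unique] (list.count ported as List.count).
def calculate_grade_distribution_with_lists_alt (grades : List String) : List String × List Int :=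
  let unique_grades := grades.foldl (fun u grade => if grade ∈ u then u else u ++ [grade]) []
  let grade_frequencies := unique_grades.map (fun grade => (grades.count grade : Int))
  (unique_grades, grade_frequencies)

-- ===== PRECONDITION & SPEC =====
def Spec_calculate_grade_distribution_with_lists (grades : List String) (out : List String × List Int) : Prop := out = calculate_grade_distribution_with_lists_alt grades
instance (grades : List String) (out : List String × List Int) : Decidable (Spec_calculate_grade_distribution_with_lists grades out) := by unfold Spec_calculate_grade_distribution_with_lists; infer_instance

-- ===== CLAIM (what is proved, stated in full; the proofs are below) =====
def Claim_equal_calculate_grade_distribution_with_lists : Prop := ∀ (grades : List String), Dom_calculate_grade_distribution_with_lists grades → Spec_calculate_grade_distribution_with_lists grades (calculate_grade_distribution_with_lists grades)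

-- ===== LEMMAS AND PROOFS =====

-- B's dedup pass, as a named function for the proofs.
def pvUniq (p : List String) : List String :=
  p.foldl (fun u g => if g ∈ u then u else u ++ [g]) []

theorem pvUniq_foldl_from (u l : List String) :
    ∀ x, x ∈ l.foldl (fun u g => if g ∈ u then u else u ++ [g]) u ↔ x ∈ u ∨ x ∈ l := by
  induction l generalizing u with
  | nil => simp
  | cons g l ih =>
    intro x
    simp only [List.foldl_cons]
    by_cases hg : g ∈ u
    · rw [if_pos hg, ih]
      constructor
      · rintro (h | h)
        · exact Or.inl h
        · exact Or.inr (List.mem_cons_of_mem _ h)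
      · rintro (h | h)
        · exact Or.inl h
        · rcases List.mem_cons.mp h with h | h
          · exact Or.inl (h ▸ hg)
          · exact Or.inr h
    · rw [if_neg hg, ih]
      simp only [List.mem_append, List.mem_cons]
      tauto

theorem mem_pvUniq (p : List String) (x : String) : x ∈ pvUniq p ↔ x ∈ p := by
  unfold pvUniq; rw [pvUniq_foldl_from]; simp

theorem nodup_pvUniq_from (u l : List String) (hu : u.Nodup) :
    (l.foldl (fun u g => if g ∈ u then u else u ++ [g]) u).Nodup := by
  induction l generalizing u with
  | nil => simpa
  | cons g l ih =>
    simp only [List.foldl_cons]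
    by_cases hg : g ∈ u
    · simpa [hg] using ih u hu
    · rw [if_neg hg]
      refine ih _ ?_
      refine List.Nodup.append hu (by simp) ?_
      intro a ha hb
      have hag : a = g := by simpa using hb
      exact hg (hag ▸ ha)

theorem nodup_pvUniq (p : List String) : (pvUniq p).Nodup :=
  nodup_pvUniq_from [] p (by simp)

theorem pvUniq_snoc (p : List String) (g : String) :
    pvUniq (p ++ [g]) = if g ∈ pvUniq p then pvUniq p else pvUniq p ++ [g] := by
  unfold pvUniq; rw [List.foldl_append]; rfl

theorem pvModify_zero {α : Type} (a : α) (l : List α) (f : α → α) :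
    (a :: l).modify 0 f = f a :: l := rfl

theorem pvModify_succ {α : Type} (a : α) (l : List α) (f : α → α) (n : Nat) :
    (a :: l).modify (n + 1) f = a :: l.modify n f := rfl

-- Bumping the counter at idxOf g in a nodup list is a pointwise update of the map.
theorem modify_map_idxOf (U : List String) (f : String → Int) (g : String)
    (hnd : U.Nodup) (hg : g ∈ U) :
    (U.map f).modify (U.idxOf g) (· + 1)
      = U.map (fun x => if x = g then f x + 1 else f x) := by
  induction U with
  | nil => cases hg
  | cons u U ih =>
    by_cases hug : u = g
    · subst hug
      have hnotin : u ∉ U := (List.nodup_cons.mp hnd).1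
      have h0 : (u :: U).idxOf u = 0 := List.idxOf_cons_self
      rw [List.map_cons, h0, pvModify_zero, List.map_cons, if_pos rfl]
      congr 1
      refine (List.map_congr_left ?_).symm
      intro x hx
      have : x ≠ u := fun h => hnotin (h ▸ hx)
      simp [this]
    · have hgU : g ∈ U := by
        rcases List.mem_cons.mp hg with h | h
        · exact absurd h.symm hug
        · exact h
      have hidx : (u :: U).idxOf g = U.idxOf g + 1 := by
        simp [hug]
      rw [List.map_cons, hidx, pvModify_succ, ih (List.nodup_cons.mp hnd).2 hgU,
        List.map_cons, if_neg hug]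

theorem count_snoc (p : List String) (g x : String) :
    (p ++ [g]).count x = p.count x + (if x = g then 1 else 0) := by
  rw [List.count_append]
  by_cases h : x = g
  · subst h; simp
  · simp [List.count_eq_zero_of_not_mem, h]

-- Main invariant: A's loop state after processing p is (pvUniq p, counts over p).
theorem pvMain (l : List String) : ∀ p : List String,
    l.foldl
      (fun s grade =>
        if grade ∈ s.1 then
          (s.1, s.2.modify (s.1.idxOf grade) (· + 1))
        else
          (s.1 ++ [grade], s.2 ++ [1]))
      (pvUniq p, (pvUniq p).map (fun x => (p.count x : Int)))
    = (pvUniq (p ++ l), (pvUniq (p ++ l)).map (fun x => ((p ++ l).count x : Int))) := by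
  induction l with
  | nil => intro p; simp
  | cons g l ih =>
    intro p
    have hstep :
        (if g ∈ pvUniq p then
          (pvUniq p, ((pvUniq p).map (fun x => (p.count x : Int))).modify ((pvUniq p).idxOf g) (· + 1))
        else
          (pvUniq p ++ [g], (pvUniq p).map (fun x => (p.count x : Int)) ++ [1]))
        = (pvUniq (p ++ [g]), (pvUniq (p ++ [g])).map (fun x => ((p ++ [g]).count x : Int))) := by
      by_cases hg : g ∈ pvUniq p
      · rw [if_pos hg, pvUniq_snoc, if_pos hg]
        congr 1
        rw [modify_map_idxOf _ _ _ (nodup_pvUniq p) hg]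
        refine List.map_congr_left ?_
        intro x _
        rw [count_snoc]
        by_cases hx : x = g <;> simp [hx]
      · rw [if_neg hg, pvUniq_snoc, if_neg hg]
        congr 1
        rw [List.map_append]
        congr 1
        · refine List.map_congr_left ?_
          intro x hx
          have hxg : x ≠ g := fun h => hg (h ▸ hx)
          rw [count_snoc]; simp [hxg]
        · have hgp : g ∉ p := fun h => hg ((mem_pvUniq p g).mpr h)
          have h1 : (p ++ [g]).count g = 1 := by
            rw [count_snoc, List.count_eq_zero_of_not_mem hgp]; simp
          simp only [List.map_cons, List.map_nil, h1]
          norm_num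
    calc (g :: l).foldl _ (pvUniq p, (pvUniq p).map (fun x => (p.count x : Int)))
        = l.foldl _ (pvUniq (p ++ [g]), (pvUniq (p ++ [g])).map (fun x => ((p ++ [g]).count x : Int))) := by
          rw [List.foldl_cons, hstep]
      _ = (pvUniq (p ++ [g] ++ l), (pvUniq (p ++ [g] ++ l)).map (fun x => ((p ++ [g] ++ l).count x : Int))) := ih (p ++ [g])
      _ = _ := by simp

-- ===== VERDICT (by name: the statement is the Claim_ definition above) =====
theorem calculate_grade_distribution_with_lists_spec : Claim_equal_calculate_grade_distribution_with_lists := by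
  intro grades _
  unfold Spec_calculate_grade_distribution_with_lists
  unfold calculate_grade_distribution_with_lists calculate_grade_distribution_with_lists_alt
  have h := pvMain grades []
  simp only [List.nil_append] at h
  rw [show (pvUniq [], (pvUniq []).map (fun x => (([] : List String).count x : Int))) = (([] : List String), ([] : List Int)) from rfl] at h
  rw [h]
  rfl
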